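-- pv_equiv track=rewrite | github.com/ejmockler/indra-belief-model | src/indra_belief/data/claim_enricher.py | _filter_aliases
-- ===== SOURCE A (Python) =====
-- _AMBIGUOUS_ALIASES = frozenset({
--     "AF-1", "AF1", "AF-2", "AF2",  # activation function domains
--     "CD", "Antigen",  # too generic
--     "PI",  # phosphatidylinositol, not insulin
--     "HR",  # hormone receptor domain
--     "NR",  # nuclear receptor
--     "AD",  # activation domain
--     "BD",  # binding domain
--     "KD",  # kinase domain / knockdown
--     "TF",  # transcription factor (generic)
--     "Receptor", "Receptors",  # too generic for aliases
--     "Protein", "Ligand",  # too generic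
-- })
--
-- def _filter_aliases(aliases: list[str], entity_name: str, canonical: str) -> list[str]:
--     """Filter aliases to keep only informative, unambiguous ones.
--
--     Priority: short symbol-like aliases first, then longer descriptive ones.
--     Allows lowercase-starting names if they look like protein identifiers
--     (e.g., p70S6K, p105, ponsin).
--     """
--     candidates = []
--     for a in aliases:
--         if a == canonical or a == entity_name:
--             continue
--         if a in _AMBIGUOUS_ALIASES:
--             continue
--         if len(a) <= 1:
--             continue
--         # Skip generic English words
--         a_lower = a.lower()
--         if a_lower in ("antigen", "protein", "receptor", "ligand", "factor",
--                         "kinase", "enzyme", "inhibitor", "substrate"):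
--             continue
--         # Skip multi-word descriptive names (>= 2 spaces)
--         if a.count(" ") >= 2:
--             continue
--         # Skip very long names
--         if len(a) > 20:
--             continue
--         # Score: shorter symbol-like names rank higher
--         # Uppercase or starts with lowercase p/c (protein convention) = good
--         is_symbol = len(a) <= 10 and a.count(" ") == 0
--         score = 0
--         if is_symbol:
--             score = 100 - len(a)  # shorter symbols ranked first
--         else:
--             score = 50 - len(a)
--         candidates.append((score, a))
--
--     # Sort by score (descending), take top 6
--     candidates.sort(key=lambda x: -x[0])
--     return [a for _, a in candidates[:6]]
-- ===== SOURCE B (Python) =====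
-- _AMBIGUOUS_ALIASES = frozenset({
--     "AF-1", "AF1", "AF-2", "AF2",
--     "CD", "Antigen",
--     "PI", "HR", "NR", "AD", "BD", "KD", "TF",
--     "Receptor", "Receptors", "Protein", "Ligand",
-- })
--
-- _GENERIC_WORDS = frozenset({
--     "antigen", "protein", "receptor", "ligand", "factor",
--     "kinase", "enzyme", "inhibitor", "substrate",
-- })
--
--
-- def _filter_aliases(aliases: list[str], entity_name: str, canonical: str) -> list[str]:
--     """Two-bucket formulation: keep an alias if it passes the filters, placing
--     symbol-like aliases (<=10 chars, no space) in one bucket and the rest in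
--     another; stably sort each bucket by length and return the first 6 of
--     symbols + others."""
--     symbols: list[str] = []
--     others: list[str] = []
--     for a in aliases:
--         if a == canonical or a == entity_name or a in _AMBIGUOUS_ALIASES:
--             continue
--         n = len(a)
--         if n <= 1 or n > 20 or a.count(" ") >= 2:
--             continue
--         if a.lower() in _GENERIC_WORDS:
--             continue
--         if n <= 10 and a.count(" ") == 0:
--             symbols.append(a)
--         else:
--             others.append(a)
--     symbols.sort(key=len)
--     others.sort(key=len)
--     return (symbols + others)[:6]
-- ===== Notes on version B (the rewrite author's own statement) =====
-- stated objective: alternative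
-- what changed: Instead of attaching an integer score (100-len for symbol-like, 50-len for others) to each kept alias and sorting the (score, alias) tuples once by descending score, B appends each kept alias to one of two buckets (symbol-like vs other), stably sorts each bucket by length alone, and returns the first 6 of symbols + others; this matches A because the two score bands never overlap.
import Mathlib
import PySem

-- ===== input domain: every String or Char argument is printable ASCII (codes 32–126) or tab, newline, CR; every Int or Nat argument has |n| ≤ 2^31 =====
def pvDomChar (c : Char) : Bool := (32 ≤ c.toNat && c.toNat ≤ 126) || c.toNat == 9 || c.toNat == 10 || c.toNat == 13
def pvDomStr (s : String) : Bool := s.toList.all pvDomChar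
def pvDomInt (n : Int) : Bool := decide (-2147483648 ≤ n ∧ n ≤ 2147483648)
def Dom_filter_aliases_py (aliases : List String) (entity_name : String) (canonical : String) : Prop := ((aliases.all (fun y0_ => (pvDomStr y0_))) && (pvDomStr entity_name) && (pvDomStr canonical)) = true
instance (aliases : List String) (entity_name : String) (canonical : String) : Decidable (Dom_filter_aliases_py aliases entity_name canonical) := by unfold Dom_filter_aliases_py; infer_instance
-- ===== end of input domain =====

-- B replaces A's per-alias integer score and single descending-score sort by two buckets
-- (symbol-like / other) each stably sorted by length and concatenated (objective: simpler).

-- module-level constants shared by both sources (_AMBIGUOUS_ALIASES and the generic-word tuple)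
def pvAmbiguous : List String :=
  ["AF-1", "AF1", "AF-2", "AF2", "CD", "Antigen", "PI", "HR", "NR", "AD", "BD", "KD", "TF",
   "Receptor", "Receptors", "Protein", "Ligand"]
def pvGeneric : List String :=
  ["antigen", "protein", "receptor", "ligand", "factor", "kinase", "enzyme", "inhibitor", "substrate"]

-- ===== PORT A =====
def filter_aliases_py (aliases : List String) (entity_name : String) (canonical : String) : List String :=
  let candidates : List (Int × String) := aliases.foldl (fun acc a =>
    if a = canonical ∨ a = entity_name then acc
    else if pvAmbiguous.contains a then acc
    else if PySem.Str.len a ≤ 1 then acc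
    else
      let a_lower := PySem.Str.lower a
      if pvGeneric.contains a_lower then acc
      else if 2 ≤ PySem.Str.count a " " then acc
      else if 20 < PySem.Str.len a then acc
      else
        let is_symbol := PySem.Str.len a ≤ 10 ∧ PySem.Str.count a " " = 0
        let score : Int := if is_symbol then 100 - PySem.Str.len a else 50 - PySem.Str.len a
        acc ++ [(score, a)]) []
  ((PySem.List.sorted candidates (fun x => -x.1) false).take 6).map (fun p => p.2)

-- ===== PORT B =====
def filter_aliases_py_alt (aliases : List String) (entity_name : String) (canonical : String) : List String :=
  let sp : List String × List String := aliases.foldl (fun sp a =>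
    if a = canonical ∨ a = entity_name ∨ pvAmbiguous.contains a then sp
    else
      let n := PySem.Str.len a
      if n ≤ 1 ∨ 20 < n ∨ 2 ≤ PySem.Str.count a " " then sp
      else if pvGeneric.contains (PySem.Str.lower a) then sp
      else if n ≤ 10 ∧ PySem.Str.count a " " = 0 then (sp.1 ++ [a], sp.2)
      else (sp.1, sp.2 ++ [a])) ([], [])
  (PySem.List.sorted sp.1 (fun a => PySem.Str.len a) false ++
   PySem.List.sorted sp.2 (fun a => PySem.Str.len a) false).take 6

-- ===== PRECONDITION & SPEC =====
def Spec_filter_aliases_py (aliases : List String) (entity_name : String) (canonical : String) (out : List String) : Prop := out = filter_aliases_py_alt aliases entity_name canonical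
instance (aliases : List String) (entity_name : String) (canonical : String) (out : List String) : Decidable (Spec_filter_aliases_py aliases entity_name canonical out) := by unfold Spec_filter_aliases_py; infer_instance

-- ===== CLAIM (what is proved, stated in full; the proofs are below) =====
def Claim_equal_filter_aliases_py : Prop := ∀ (aliases : List String) (entity_name : String) (canonical : String), Dom_filter_aliases_py aliases entity_name canonical → Spec_filter_aliases_py aliases entity_name canonical (filter_aliases_py aliases entity_name canonical)

-- ===== LEMMAS AND PROOFS =====

-- the shared keep-filter and the symbol test / score, as proof-side abbreviations
def pvKeep (entity_name canonical : String) (a : String) : Bool :=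
  !(a == canonical) && !(a == entity_name) && !(pvAmbiguous.contains a) &&
  !(decide (PySem.Str.len a ≤ 1)) && !(pvGeneric.contains (PySem.Str.lower a)) &&
  !(decide (2 ≤ PySem.Str.count a " ")) && !(decide (20 < PySem.Str.len a))

def pvSym (a : String) : Bool := decide (PySem.Str.len a ≤ 10) && decide (PySem.Str.count a " " = 0)

def pvScore (a : String) : Int :=
  if pvSym a then 100 - PySem.Str.len a else 50 - PySem.Str.len a

-- insertBy: structural equations and congruence/shape lemmas
theorem pv_insertBy_nil {α : Type} (b : α → α → Bool) (x : α) :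
    PySem.List.insertBy b x [] = [x] := by simp [PySem.List.insertBy]

theorem pv_insertBy_cons {α : Type} (b : α → α → Bool) (x y : α) (ys : List α) :
    PySem.List.insertBy b x (y :: ys) =
      if b x y then x :: y :: ys else y :: PySem.List.insertBy b x ys := by
  simp [PySem.List.insertBy]

theorem pv_insertBy_congr {α : Type} (b₁ b₂ : α → α → Bool) (x : α) (ys : List α)
    (h : ∀ y ∈ ys, b₁ x y = b₂ x y) :
    PySem.List.insertBy b₁ x ys = PySem.List.insertBy b₂ x ys := by
  induction ys with
  | nil => simp [pv_insertBy_nil]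
  | cons y ys ih =>
    rw [pv_insertBy_cons, pv_insertBy_cons, h y (by simp),
        ih (fun z hz => h z (by simp [hz]))]

theorem pv_insertBy_map {α β : Type} (b : β → β → Bool) (f : α → β) (x : α) (ys : List α) :
    PySem.List.insertBy b (f x) (ys.map f) =
      (PySem.List.insertBy (fun u v => b (f u) (f v)) x ys).map f := by
  induction ys with
  | nil => simp [pv_insertBy_nil]
  | cons y ys ih =>
    simp only [List.map_cons, pv_insertBy_cons]
    by_cases h : b (f x) (f y) <;> simp [h, ih]

theorem pv_insertBy_append_left {α : Type} (b : α → α → Bool) (x : α) (A B : List α)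
    (h : ∀ y ∈ B, b x y = true) :
    PySem.List.insertBy b x (A ++ B) = PySem.List.insertBy b x A ++ B := by
  induction A with
  | nil =>
    cases B with
    | nil => simp [pv_insertBy_nil]
    | cons y ys => simp [pv_insertBy_nil, pv_insertBy_cons, h y (by simp)]
  | cons a A ih =>
    rw [List.cons_append, pv_insertBy_cons, pv_insertBy_cons]
    by_cases hb : b x a <;> simp [hb, ih]

theorem pv_insertBy_append_right {α : Type} (b : α → α → Bool) (x : α) (A B : List α)
    (h : ∀ y ∈ A, b x y = false) :
    PySem.List.insertBy b x (A ++ B) = A ++ PySem.List.insertBy b x B := by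
  induction A with
  | nil => simp
  | cons a A ih =>
    rw [List.cons_append, pv_insertBy_cons, h a (by simp), List.cons_append,
        ih (fun z hz => h z (by simp [hz]))]
    simp

-- sorted commutes with map (insertion sort only looks at keys)
theorem pv_sorted_map {α β κ : Type} [LinearOrder κ] (f : α → β) (key : β → κ) (l : List α) :
    PySem.List.sorted (l.map f) key false = (PySem.List.sorted l (fun a => key (f a)) false).map f := by
  rw [PySem.List.sorted_eq_foldl_insertBy, PySem.List.sorted_eq_foldl_insertBy]
  suffices h : ∀ (acc : List α),
      (l.map f).foldl (fun acc x => PySem.List.insertBy (fun a b => decide (key a < key b)) x acc) (acc.map f) =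
      (l.foldl (fun acc x => PySem.List.insertBy (fun a b => decide (key (f a) < key (f b))) x acc) acc).map f by
    simpa using h []
  induction l with
  | nil => intro acc; simp
  | cons a l ih =>
    intro acc
    simp only [List.map_cons, List.foldl_cons]
    rw [pv_insertBy_map (fun u v => decide (key u < key v)) f a acc, ih]

-- a stable insertion sort splits over a strict key separation
theorem pv_foldl_insert_split {α κ : Type} [LinearOrder κ] (key : α → κ) (P : α → Bool)
    (hsep : ∀ x y, P x = true → P y = false → key x < key y) :
    ∀ (xs S O : List α), (∀ a ∈ S, P a = true) → (∀ b ∈ O, P b = false) →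
      xs.foldl (fun acc x => PySem.List.insertBy (fun a b => decide (key a < key b)) x acc) (S ++ O) =
      (xs.filter P).foldl (fun acc x => PySem.List.insertBy (fun a b => decide (key a < key b)) x acc) S ++
      (xs.filter (fun a => !P a)).foldl (fun acc x => PySem.List.insertBy (fun a b => decide (key a < key b)) x acc) O := by
  intro xs
  induction xs with
  | nil => intro S O _ _; simp
  | cons x xs ih =>
    intro S O hS hO
    by_cases hx : P x = true
    · have hstep : PySem.List.insertBy (fun a b => decide (key a < key b)) x (S ++ O) =
          PySem.List.insertBy (fun a b => decide (key a < key b)) x S ++ O := by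
        apply pv_insertBy_append_left
        intro y hy
        simp [hsep x y hx (hO y hy)]
      have hS' : ∀ a ∈ PySem.List.insertBy (fun a b => decide (key a < key b)) x S, P a = true := by
        intro a ha
        rcases (PySem.List.mem_insertBy _ x a S).1 ha with h | h
        · exact h ▸ hx
        · exact hS a h
      simp only [List.foldl_cons, hstep, List.filter_cons, hx, Bool.not_true, if_true]
      rw [ih _ O hS' hO]
      simp
    · have hx' : P x = false := by simpa using hx
      have hstep : PySem.List.insertBy (fun a b => decide (key a < key b)) x (S ++ O) =
          S ++ PySem.List.insertBy (fun a b => decide (key a < key b)) x O := by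
        apply pv_insertBy_append_right
        intro y hy
        have := hsep y x (hS y hy) hx'
        simp [not_lt_of_gt this]
      have hO' : ∀ b ∈ PySem.List.insertBy (fun a b => decide (key a < key b)) x O, P b = false := by
        intro b hb
        rcases (PySem.List.mem_insertBy _ x b O).1 hb with h | h
        · exact h ▸ hx'
        · exact hO b h
      simp only [List.foldl_cons, hstep, List.filter_cons, hx', Bool.not_false]
      rw [ih S _ hS hO']
      simp

theorem pv_sorted_split {α κ : Type} [LinearOrder κ] (key : α → κ) (P : α → Bool)
    (hsep : ∀ x y, P x = true → P y = false → key x < key y) (l : List α) :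
    PySem.List.sorted l key false =
      PySem.List.sorted (l.filter P) key false ++ PySem.List.sorted (l.filter (fun a => !P a)) key false := by
  rw [PySem.List.sorted_eq_foldl_insertBy, PySem.List.sorted_eq_foldl_insertBy,
      PySem.List.sorted_eq_foldl_insertBy]
  simpa using pv_foldl_insert_split key P hsep l [] [] (by simp) (by simp)

-- sorting by order-equivalent keys (pairwise on the list) gives the same list
theorem pv_sorted_congr {α κ₁ κ₂ : Type} [LinearOrder κ₁] [LinearOrder κ₂]
    (k₁ : α → κ₁) (k₂ : α → κ₂) (l : List α)
    (h : ∀ x ∈ l, ∀ y ∈ l, (k₁ x < k₁ y ↔ k₂ x < k₂ y)) :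
    PySem.List.sorted l k₁ false = PySem.List.sorted l k₂ false := by
  rw [PySem.List.sorted_eq_foldl_insertBy, PySem.List.sorted_eq_foldl_insertBy]
  suffices haux : ∀ (xs acc : List α), (∀ x ∈ xs, x ∈ l) → (∀ y ∈ acc, y ∈ l) →
      xs.foldl (fun acc x => PySem.List.insertBy (fun a b => decide (k₁ a < k₁ b)) x acc) acc =
      xs.foldl (fun acc x => PySem.List.insertBy (fun a b => decide (k₂ a < k₂ b)) x acc) acc by
    exact haux l [] (fun _ hx => hx) (by simp)
  intro xs
  induction xs with
  | nil => intro acc _ _; simp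
  | cons x xs ih =>
    intro acc hxs hacc
    have hx : x ∈ l := hxs x (by simp)
    have hstep : PySem.List.insertBy (fun a b => decide (k₁ a < k₁ b)) x acc =
        PySem.List.insertBy (fun a b => decide (k₂ a < k₂ b)) x acc := by
      apply pv_insertBy_congr
      intro y hy
      simp [h x hx y (hacc y hy)]
    simp only [List.foldl_cons, hstep]
    apply ih
    · intro z hz; exact hxs z (by simp [hz])
    · intro z hz
      rcases (PySem.List.mem_insertBy _ x z acc).1 hz with hz' | hz'
      · exact hz' ▸ hx
      · exact hacc z hz'

-- pvKeep expressed as its seven component facts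
theorem pv_keep_iff (entity_name canonical a : String) :
    pvKeep entity_name canonical a = true ↔
      (¬ a = canonical ∧ ¬ a = entity_name ∧ pvAmbiguous.contains a = false ∧
       ¬ PySem.Str.len a ≤ 1 ∧ pvGeneric.contains (PySem.Str.lower a) = false ∧
       ¬ 2 ≤ PySem.Str.count a " " ∧ ¬ 20 < PySem.Str.len a) := by
  unfold pvKeep
  simp only [Bool.and_eq_true, Bool.not_eq_true', beq_eq_false_iff_ne, ne_eq,
    decide_eq_false_iff_not]
  tauto

theorem pv_keep_false_of (entity_name canonical a : String)
    (h : a = canonical ∨ a = entity_name ∨ pvAmbiguous.contains a = true ∨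
         PySem.Str.len a ≤ 1 ∨ pvGeneric.contains (PySem.Str.lower a) = true ∨
         2 ≤ PySem.Str.count a " " ∨ 20 < PySem.Str.len a) :
    pvKeep entity_name canonical a = false := by
  rw [Bool.eq_false_iff, ne_eq, pv_keep_iff]
  intro ⟨h1, h2, h3, h4, h5, h6, h7⟩
  rcases h with h | h | h | h | h | h | h
  · exact h1 h
  · exact h2 h
  · rw [h] at h3; exact absurd h3 (by decide)
  · exact h4 h
  · rw [h] at h5; exact absurd h5 (by decide)
  · exact h6 h
  · exact h7 h

-- the symbol test, unfolded
theorem pv_sym_iff (a : String) :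
    pvSym a = true ↔ (PySem.Str.len a ≤ 10 ∧ PySem.Str.count a " " = 0) := by
  unfold pvSym
  rw [Bool.and_eq_true, decide_eq_true_eq, decide_eq_true_eq]

-- the symbol test as an if over its proposition
theorem pv_sym_ite {γ : Type} (a : String) (x y : γ) :
    (if PySem.Str.len a ≤ 10 ∧ PySem.Str.count a " " = 0 then x else y) =
      (if pvSym a then x else y) := by
  by_cases h : PySem.Str.len a ≤ 10 ∧ PySem.Str.count a " " = 0
  · rw [if_pos h, if_pos ((pv_sym_iff a).2 h)]
  · rw [if_neg h, if_neg (fun hs => h ((pv_sym_iff a).1 hs))]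

-- A's loop body, as one keep-guarded append
theorem pv_stepA (entity_name canonical a : String) (acc : List (Int × String)) :
    (if a = canonical ∨ a = entity_name then acc
     else if pvAmbiguous.contains a then acc
     else if PySem.Str.len a ≤ 1 then acc
     else
       let a_lower := PySem.Str.lower a
       if pvGeneric.contains a_lower then acc
       else if 2 ≤ PySem.Str.count a " " then acc
       else if 20 < PySem.Str.len a then acc
       else
         let is_symbol := PySem.Str.len a ≤ 10 ∧ PySem.Str.count a " " = 0
         let score : Int := if is_symbol then 100 - PySem.Str.len a else 50 - PySem.Str.len a
         acc ++ [(score, a)]) =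
    (if pvKeep entity_name canonical a then acc ++ [(pvScore a, a)] else acc) := by
  dsimp only []
  by_cases h1 : a = canonical ∨ a = entity_name
  · rw [if_pos h1, pv_keep_false_of entity_name canonical a (by tauto)]
    simp only [Bool.false_eq_true, if_false]
  rw [if_neg h1]
  by_cases h2 : pvAmbiguous.contains a = true
  · rw [if_pos h2, pv_keep_false_of entity_name canonical a (by tauto)]
    simp only [Bool.false_eq_true, if_false]
  rw [if_neg h2]
  by_cases h3 : PySem.Str.len a ≤ 1
  · rw [if_pos h3, pv_keep_false_of entity_name canonical a (by tauto)]
    simp only [Bool.false_eq_true, if_false]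
  rw [if_neg h3]
  by_cases h4 : pvGeneric.contains (PySem.Str.lower a) = true
  · rw [if_pos h4, pv_keep_false_of entity_name canonical a (by tauto)]
    simp only [Bool.false_eq_true, if_false]
  rw [if_neg h4]
  by_cases h5 : 2 ≤ PySem.Str.count a " "
  · rw [if_pos h5, pv_keep_false_of entity_name canonical a (by tauto)]
    simp only [Bool.false_eq_true, if_false]
  rw [if_neg h5]
  by_cases h6 : 20 < PySem.Str.len a
  · rw [if_pos h6, pv_keep_false_of entity_name canonical a (by tauto)]
    simp only [Bool.false_eq_true, if_false]
  rw [if_neg h6]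
  have hk : pvKeep entity_name canonical a = true := by
    rw [pv_keep_iff]
    push_neg at h1
    exact ⟨h1.1, h1.2, by simpa using h2, h3, by simpa using h4, h5, h6⟩
  rw [pv_sym_ite, if_pos hk]
  unfold pvScore
  rfl

-- A's accumulation loop is a filter + map
theorem pv_foldA (aliases : List String) (entity_name canonical : String) :
    aliases.foldl (fun (acc : List (Int × String)) a =>
      if a = canonical ∨ a = entity_name then acc
      else if pvAmbiguous.contains a then acc
      else if PySem.Str.len a ≤ 1 then acc
      else
        let a_lower := PySem.Str.lower a
        if pvGeneric.contains a_lower then acc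
        else if 2 ≤ PySem.Str.count a " " then acc
        else if 20 < PySem.Str.len a then acc
        else
          let is_symbol := PySem.Str.len a ≤ 10 ∧ PySem.Str.count a " " = 0
          let score : Int := if is_symbol then 100 - PySem.Str.len a else 50 - PySem.Str.len a
          acc ++ [(score, a)]) [] =
    ((aliases.filter (pvKeep entity_name canonical)).map (fun a => (pvScore a, a))) := by
  have hfun : (fun (acc : List (Int × String)) a =>
      if a = canonical ∨ a = entity_name then acc
      else if pvAmbiguous.contains a then acc
      else if PySem.Str.len a ≤ 1 then acc
      else
        let a_lower := PySem.Str.lower a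
        if pvGeneric.contains a_lower then acc
        else if 2 ≤ PySem.Str.count a " " then acc
        else if 20 < PySem.Str.len a then acc
        else
          let is_symbol := PySem.Str.len a ≤ 10 ∧ PySem.Str.count a " " = 0
          let score : Int := if is_symbol then 100 - PySem.Str.len a else 50 - PySem.Str.len a
          acc ++ [(score, a)]) =
      (fun acc a => if pvKeep entity_name canonical a then acc ++ [((fun a => (pvScore a, a)) a)] else acc) := by
    funext acc a
    exact pv_stepA entity_name canonical a acc
  rw [hfun, PySem.List.foldl_append_if (pvKeep entity_name canonical) (fun a => (pvScore a, a)) aliases []]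
  simp

-- B's loop body, as a keep/symbol-guarded append to one of the two buckets
theorem pv_stepB (entity_name canonical a : String) (sp : List String × List String) :
    (if a = canonical ∨ a = entity_name ∨ pvAmbiguous.contains a then sp
     else
       let n := PySem.Str.len a
       if n ≤ 1 ∨ 20 < n ∨ 2 ≤ PySem.Str.count a " " then sp
       else if pvGeneric.contains (PySem.Str.lower a) then sp
       else if n ≤ 10 ∧ PySem.Str.count a " " = 0 then (sp.1 ++ [a], sp.2)
       else (sp.1, sp.2 ++ [a])) =
    (if pvKeep entity_name canonical a then
       (if pvSym a then (sp.1 ++ [a], sp.2) else (sp.1, sp.2 ++ [a]))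
     else sp) := by
  dsimp only []
  by_cases h1 : a = canonical ∨ a = entity_name ∨ pvAmbiguous.contains a = true
  · rw [if_pos h1, pv_keep_false_of entity_name canonical a (by tauto)]
    simp only [Bool.false_eq_true, if_false]
  rw [if_neg h1]
  by_cases h2 : PySem.Str.len a ≤ 1 ∨ 20 < PySem.Str.len a ∨ 2 ≤ PySem.Str.count a " "
  · rw [if_pos h2, pv_keep_false_of entity_name canonical a (by tauto)]
    simp only [Bool.false_eq_true, if_false]
  rw [if_neg h2]
  by_cases h3 : pvGeneric.contains (PySem.Str.lower a) = true
  · rw [if_pos h3, pv_keep_false_of entity_name canonical a (by tauto)]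
    simp only [Bool.false_eq_true, if_false]
  rw [if_neg h3]
  have hk : pvKeep entity_name canonical a = true := by
    rw [pv_keep_iff]
    push_neg at h1 h2
    exact ⟨h1.1, h1.2.1, by simpa using h1.2.2, by omega, by simpa using h3, by omega, by omega⟩
  rw [pv_sym_ite, if_pos hk]

-- B's accumulation loop builds the two filtered buckets
theorem pv_foldB (aliases : List String) (entity_name canonical : String) :
    ∀ (S O : List String),
      aliases.foldl (fun (sp : List String × List String) a =>
        if a = canonical ∨ a = entity_name ∨ pvAmbiguous.contains a then sp
        else
          let n := PySem.Str.len a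
          if n ≤ 1 ∨ 20 < n ∨ 2 ≤ PySem.Str.count a " " then sp
          else if pvGeneric.contains (PySem.Str.lower a) then sp
          else if n ≤ 10 ∧ PySem.Str.count a " " = 0 then (sp.1 ++ [a], sp.2)
          else (sp.1, sp.2 ++ [a])) (S, O) =
      (S ++ (aliases.filter (pvKeep entity_name canonical)).filter pvSym,
       O ++ (aliases.filter (pvKeep entity_name canonical)).filter (fun a => !pvSym a)) := by
  induction aliases with
  | nil => intro S O; simp
  | cons a aliases ih =>
    intro S O
    rw [List.foldl_cons, pv_stepB entity_name canonical a (S, O)]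
    by_cases hk : pvKeep entity_name canonical a = true
    · by_cases hs : pvSym a = true
      · rw [if_pos (by simp [hk]), if_pos (by simp [hs]), ih (S ++ [a]) O]
        simp [List.filter_cons, hk, hs]
      · have hs' : pvSym a = false := by simpa using hs
        rw [if_pos (by simp [hk]), if_neg (by simp [hs']), ih S (O ++ [a])]
        simp [List.filter_cons, hk, hs']
    · have hk' : pvKeep entity_name canonical a = false := by simpa using hk
      rw [if_neg (by simp [hk']), ih S O]
      simp [List.filter_cons, hk']

-- on kept aliases the score threshold -50 separates exactly the symbol bucket
theorem pv_score_key (l : List String) (entity_name canonical : String)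
    (hl : ∀ a ∈ l, pvKeep entity_name canonical a = true) :
    (l.filter (fun a => decide (-(pvScore a) < -50)) = l.filter pvSym) ∧
    (l.filter (fun a => !decide (-(pvScore a) < -50)) = l.filter (fun a => !pvSym a)) := by
  have hpt : ∀ a ∈ l, (decide (-(pvScore a) < -50)) = pvSym a := by
    intro a ha
    have hk := (pv_keep_iff entity_name canonical a).1 (hl a ha)
    have hlen : ¬ PySem.Str.len a ≤ 1 := hk.2.2.2.1
    by_cases hs : pvSym a = true
    · have h10 : PySem.Str.len a ≤ 10 := by
        have := hs
        simp only [pvSym, Bool.and_eq_true, decide_eq_true_eq] at this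
        exact this.1
      rw [hs]
      simp only [pvScore, hs, if_true, decide_eq_true_eq]
      omega
    · have hs' : pvSym a = false := by simpa using hs
      rw [hs']
      simp only [pvScore, hs', Bool.false_eq_true, if_false, decide_eq_false_iff_not]
      omega
  constructor
  · exact List.filter_congr hpt
  · exact List.filter_congr (fun a ha => by rw [hpt a ha])

-- ===== VERDICT (by name: the statement is the Claim_ definition above) =====
theorem filter_aliases_py_spec : Claim_equal_filter_aliases_py := by
  intro aliases entity_name canonical _hdom
  unfold Spec_filter_aliases_py filter_aliases_py filter_aliases_py_alt
  rw [pv_foldA aliases entity_name canonical, pv_foldB aliases entity_name canonical [] []]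
  simp only [List.nil_append]
  set kept := aliases.filter (pvKeep entity_name canonical) with hkept
  have hkeep : ∀ a ∈ kept, pvKeep entity_name canonical a = true := by
    intro a ha; exact (List.mem_filter.1 ha).2
  -- A-side: push the map through the sort, drop the pairing
  rw [pv_sorted_map (fun a => (pvScore a, a)) (fun x : Int × String => -x.1) kept]
  -- split the single sort into the two buckets
  have hsep : ∀ x y : String, decide (-(pvScore x) < -50) = true → decide (-(pvScore y) < -50) = false →
      -(pvScore x) < -(pvScore y) := by
    intro x y hx hy
    simp only [decide_eq_true_eq] at hx
    simp only [decide_eq_false_iff_not, not_lt] at hy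
    omega
  rw [pv_sorted_split (fun a : String => -(pvScore a)) (fun a => decide (-(pvScore a) < -50)) hsep kept]
  obtain ⟨hfs, hfo⟩ := pv_score_key kept entity_name canonical hkeep
  rw [hfs, hfo]
  -- within each bucket the score order is the length order
  have hcs : PySem.List.sorted (kept.filter pvSym) (fun a : String => -(pvScore a)) false =
      PySem.List.sorted (kept.filter pvSym) (fun a => PySem.Str.len a) false := by
    apply pv_sorted_congr
    intro x hx y hy
    have hx' := (List.mem_filter.1 hx).2
    have hy' := (List.mem_filter.1 hy).2
    simp only [pvScore, hx', hy', if_true]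
    omega
  have hco : PySem.List.sorted (kept.filter (fun a => !pvSym a)) (fun a : String => -(pvScore a)) false =
      PySem.List.sorted (kept.filter (fun a => !pvSym a)) (fun a => PySem.Str.len a) false := by
    apply pv_sorted_congr
    intro x hx y hy
    have hx' : pvSym x = false := by simpa using (List.mem_filter.1 hx).2
    have hy' : pvSym y = false := by simpa using (List.mem_filter.1 hy).2
    simp only [pvScore, hx', hy', Bool.false_eq_true, if_false]
    omega
  rw [hcs, hco]
  -- take 6 then strip the pairing = strip inside the buckets
  rw [← List.map_take]
  simp [Function.comp_def]
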